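-- pv_equiv track=rewrite | github.com/jeanollion/distnet2d | distnet_2d/data/dydx_iterator.py | _get_labels_at_frame
-- ===== SOURCE A (Python) =====
-- from collections import deque
--
-- def _get_labels_at_frame(label, frame, target_previous_frame, labels_map_prev_by_f, labels_map_gap_prev_by_f):
--     if frame < target_previous_frame:
--         return []
--     if frame == target_previous_frame:
--         return [label]
--
--     visited = set()
--     queue = deque()
--     queue.append((label, frame))
--     visited.add((label, frame))
--     result = set()
--
--     while queue:
--         current_label, current_frame = queue.popleft()
--         if current_frame == target_previous_frame:
--             result.add(current_label)
--             continue
--         if current_frame < target_previous_frame: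
--             continue  # Skip if we've gone past the target frame
--         # Check gap links first (mutually exclusive with prev frame links)
--         if current_frame in labels_map_gap_prev_by_f and current_label in labels_map_gap_prev_by_f[current_frame]:
--             lf = labels_map_gap_prev_by_f[current_frame][current_label]
--             if lf[1] >= target_previous_frame and lf not in visited:
--                 visited.add(lf)
--                 queue.append(lf)
--         else: # Check immediate previous frame links
--             if current_frame in labels_map_prev_by_f and current_label in labels_map_prev_by_f[current_frame]:
--                 for prev_label in labels_map_prev_by_f[current_frame][current_label]:
--                     lf = (prev_label, current_frame - 1)
--                     if lf not in visited:
--                         visited.add(lf)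
--                         queue.append(lf)
--     return set(result)
-- ===== SOURCE B (Python) =====
-- def _get_labels_at_frame(label, frame, target_previous_frame, labels_map_prev_by_f, labels_map_gap_prev_by_f):
--     if frame < target_previous_frame:
--         return []
--     if frame == target_previous_frame:
--         return [label]
--
--     visited = {(label, frame)}
--     result = []
--
--     def visit(lbl, fr):
--         # depth-first walk backwards through the lineage graph
--         if fr == target_previous_frame:
--             result.append(lbl)
--             return
--         if fr < target_previous_frame:
--             return
--         # gap links first (mutually exclusive with prev frame links)
--         gd = labels_map_gap_prev_by_f.get(fr)
--         if gd is not None and lbl in gd: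
--             lf = gd[lbl]
--             if lf[1] >= target_previous_frame and lf not in visited:
--                 visited.add(lf)
--                 visit(lf[0], lf[1])
--         else:
--             pd = labels_map_prev_by_f.get(fr)
--             if pd is not None and lbl in pd:
--                 for p in pd[lbl]:
--                     q = (p, fr - 1)
--                     if q not in visited:
--                         visited.add(q)
--                         visit(p, fr - 1)
--
--     visit(label, frame)
--     return set(result)
-- ===== Notes on version B (the rewrite author's own statement) =====
-- stated objective: alternative
-- what changed: Replaces the iterative FIFO-deque breadth-first search with a recursive depth-first traversal: a nested visit() helper that recurses on each freshly marked predecessor (gap link or prev links), so the deque and the result set disappear (found labels are appended to a list and deduplicated by the final set()).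
import Mathlib
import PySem

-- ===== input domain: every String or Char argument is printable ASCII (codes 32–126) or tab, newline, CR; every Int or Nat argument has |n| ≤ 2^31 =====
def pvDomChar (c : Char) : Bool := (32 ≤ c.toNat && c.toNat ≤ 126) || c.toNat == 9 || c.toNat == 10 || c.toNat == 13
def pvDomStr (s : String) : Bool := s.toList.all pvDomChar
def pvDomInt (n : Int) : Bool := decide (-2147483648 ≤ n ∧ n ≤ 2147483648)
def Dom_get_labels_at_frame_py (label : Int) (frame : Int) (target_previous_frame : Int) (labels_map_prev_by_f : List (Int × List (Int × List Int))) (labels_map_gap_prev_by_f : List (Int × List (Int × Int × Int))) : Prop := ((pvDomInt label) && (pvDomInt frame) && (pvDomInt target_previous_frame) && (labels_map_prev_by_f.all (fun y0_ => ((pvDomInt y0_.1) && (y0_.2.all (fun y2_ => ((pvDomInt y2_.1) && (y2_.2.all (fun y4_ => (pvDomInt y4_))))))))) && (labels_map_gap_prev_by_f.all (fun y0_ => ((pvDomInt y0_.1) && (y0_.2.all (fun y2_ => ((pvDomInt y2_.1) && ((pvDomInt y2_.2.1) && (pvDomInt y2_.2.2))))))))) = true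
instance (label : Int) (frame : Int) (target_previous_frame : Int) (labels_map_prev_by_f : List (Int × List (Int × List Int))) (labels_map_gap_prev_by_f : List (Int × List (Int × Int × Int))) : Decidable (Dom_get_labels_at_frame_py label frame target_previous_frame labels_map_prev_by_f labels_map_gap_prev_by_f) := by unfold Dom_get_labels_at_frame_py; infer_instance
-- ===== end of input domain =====

-- ===== PORT A =====
-- B replaces A's deque-driven breadth-first search by a recursive depth-first traversal
-- (a nested visit() function recursing on each freshly marked predecessor; the deque and
-- the result set disappear).  Both Pythons return a SET in the general case; since Python's
-- set iteration order is not modelled, both ports represent that returned set canonically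
-- as the sorted list of its distinct elements (the outputs are compared as finite sets).
-- Both loop ports carry a Nat fuel = pvFuel, a bound on the number of fresh node discoveries
-- (1 + one per gap entry / per prev-label entry), so the fuel never runs out on any input.
def pvFuel (prev : List (Int × List (Int × List Int))) (gap : List (Int × List (Int × Int × Int))) : Nat :=
  1 + (gap.map (fun p => p.2.length)).sum
    + (prev.map (fun p => (p.2.map (fun q => q.2.length)).sum)).sum

-- A: the inner 'for prev_label in …' loop (visited.add + queue.append on fresh nodes)
def pvAExpandPrev (f : Int) (lst : List Int)
    (visited : PySem.Set (Int × Int)) (queue : List (Int × Int)) :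
    PySem.Set (Int × Int) × List (Int × Int) :=
  lst.foldl (fun s p =>
      if (p, f - 1) ∈ s.1 then s else (PySem.Set.add s.1 (p, f - 1), s.2 ++ [(p, f - 1)]))
    (visited, queue)

-- A: the 'while queue' loop, one dequeue per fuel unit
def pvALoop (t : Int) (prev : List (Int × List (Int × List Int)))
    (gap : List (Int × List (Int × Int × Int))) :
    Nat → List (Int × Int) → PySem.Set (Int × Int) → PySem.Set Int → PySem.Set Int
  | 0, _, _, result => result
  | _ + 1, [], _, result => result
  | fuel + 1, (l, f) :: qs, visited, result =>
    if f = t then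
      pvALoop t prev gap fuel qs visited (PySem.Set.add result l)
    else if f < t then
      pvALoop t prev gap fuel qs visited result
    else
      match ((PySem.Dict.mk gap).get? f).bind (fun gd => (PySem.Dict.mk gd).get? l) with
      | some lf =>
        if t ≤ lf.2 ∧ lf ∉ visited then
          pvALoop t prev gap fuel (qs ++ [lf]) (PySem.Set.add visited lf) result
        else pvALoop t prev gap fuel qs visited result
      | none =>
        match ((PySem.Dict.mk prev).get? f).bind (fun pd => (PySem.Dict.mk pd).get? l) with
        | some lst =>
          let s := pvAExpandPrev f lst visited qs
          pvALoop t prev gap fuel s.2 s.1 result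
        | none => pvALoop t prev gap fuel qs visited result

-- 'return set(result)': the returned set, canonically as its sorted element list
def get_labels_at_frame_py (label : Int) (frame : Int) (target_previous_frame : Int) (labels_map_prev_by_f : List (Int × List (Int × List Int))) (labels_map_gap_prev_by_f : List (Int × List (Int × Int × Int))) : List Int :=
  if frame < target_previous_frame then []
  else if frame = target_previous_frame then [label]
  else
    PySem.List.sorted
      (PySem.Set.ofList
        (pvALoop target_previous_frame labels_map_prev_by_f labels_map_gap_prev_by_f
          (pvFuel labels_map_prev_by_f labels_map_gap_prev_by_f)
          [(label, frame)]
          (PySem.Set.add PySem.Set.empty (label, frame))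
          PySem.Set.empty))
      (fun x => x) false

-- ===== PORT B =====
-- B: the recursive 'visit' helper of Source B; the state threaded through the recursion is the
-- (visited, result) pair that Source B's nested function mutates.  One fuel unit per call on a
-- freshly marked node.
def pvBVisit (t : Int) (prev : List (Int × List (Int × List Int)))
    (gap : List (Int × List (Int × Int × Int))) :
    Nat → Int → Int → PySem.Set (Int × Int) × List Int → PySem.Set (Int × Int) × List Int
  | 0, _, _, s => s
  | fuel + 1, l, f, s =>
    if f = t then (s.1, s.2 ++ [l])
    else if f < t then s
    else
      match ((PySem.Dict.mk gap).get? f).bind (fun gd => (PySem.Dict.mk gd).get? l) with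
      | some lf =>
        if t ≤ lf.2 ∧ lf ∉ s.1 then
          pvBVisit t prev gap fuel lf.1 lf.2 (PySem.Set.add s.1 lf, s.2)
        else s
      | none =>
        match ((PySem.Dict.mk prev).get? f).bind (fun pd => (PySem.Dict.mk pd).get? l) with
        | some lst =>
          lst.foldl (fun s2 p =>
            if (p, f - 1) ∈ s2.1 then s2
            else pvBVisit t prev gap fuel p (f - 1) (PySem.Set.add s2.1 (p, f - 1), s2.2)) s
        | none => s

-- 'return set(result)': the returned set, canonically as its sorted element list
def get_labels_at_frame_py_alt (label : Int) (frame : Int) (target_previous_frame : Int) (labels_map_prev_by_f : List (Int × List (Int × List Int))) (labels_map_gap_prev_by_f : List (Int × List (Int × Int × Int))) : List Int :=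
  if frame < target_previous_frame then []
  else if frame = target_previous_frame then [label]
  else
    PySem.List.sorted
      (PySem.Set.ofList
        (pvBVisit target_previous_frame labels_map_prev_by_f labels_map_gap_prev_by_f
          (pvFuel labels_map_prev_by_f labels_map_gap_prev_by_f)
          label frame
          (PySem.Set.add PySem.Set.empty (label, frame), [])).2)
      (fun x => x) false

-- ===== PRECONDITION & SPEC =====
def Spec_get_labels_at_frame_py (label : Int) (frame : Int) (target_previous_frame : Int) (labels_map_prev_by_f : List (Int × List (Int × List Int))) (labels_map_gap_prev_by_f : List (Int × List (Int × Int × Int))) (out : List Int) : Prop := out = get_labels_at_frame_py_alt label frame target_previous_frame labels_map_prev_by_f labels_map_gap_prev_by_f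
instance (label : Int) (frame : Int) (target_previous_frame : Int) (labels_map_prev_by_f : List (Int × List (Int × List Int))) (labels_map_gap_prev_by_f : List (Int × List (Int × Int × Int))) (out : List Int) : Decidable (Spec_get_labels_at_frame_py label frame target_previous_frame labels_map_prev_by_f labels_map_gap_prev_by_f out) := by unfold Spec_get_labels_at_frame_py; infer_instance

-- ===== CLAIM (what is proved, stated in full; the proofs are below) =====
def Claim_equal_get_labels_at_frame_py : Prop := ∀ (label : Int) (frame : Int) (target_previous_frame : Int) (labels_map_prev_by_f : List (Int × List (Int × List Int))) (labels_map_gap_prev_by_f : List (Int × List (Int × Int × Int))), Dom_get_labels_at_frame_py label frame target_previous_frame labels_map_prev_by_f labels_map_gap_prev_by_f → Spec_get_labels_at_frame_py label frame target_previous_frame labels_map_prev_by_f labels_map_gap_prev_by_f (get_labels_at_frame_py label frame target_previous_frame labels_map_prev_by_f labels_map_gap_prev_by_f)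

-- ===== LEMMAS AND PROOFS =====

-- The one-step successor list of a node in the lineage graph both programs walk:
-- nothing below or at the target frame; the gap link (if eligible) else the prev links.
def pvSuccs (t : Int) (prev : List (Int × List (Int × List Int)))
    (gap : List (Int × List (Int × Int × Int))) (x : Int × Int) : List (Int × Int) :=
  if x.2 ≤ t then []
  else
    match ((PySem.Dict.mk gap).get? x.2).bind (fun gd => (PySem.Dict.mk gd).get? x.1) with
    | some lf => if t ≤ lf.2 then [lf] else []
    | none =>
      match ((PySem.Dict.mk prev).get? x.2).bind (fun pd => (PySem.Dict.mk pd).get? x.1) with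
      | some lst => lst.map (fun p => (p, x.2 - 1))
      | none => []

def pvStep (t : Int) (prev : List (Int × List (Int × List Int)))
    (gap : List (Int × List (Int × Int × Int))) (a b : Int × Int) : Prop :=
  b ∈ pvSuccs t prev gap a

def pvReach (t : Int) (prev : List (Int × List (Int × List Int)))
    (gap : List (Int × List (Int × Int × Int))) (a b : Int × Int) : Prop :=
  Relation.ReflTransGen (pvStep t prev gap) a b

-- the finite universe every freshly discovered node lives in
def pvU (prev : List (Int × List (Int × List Int)))
    (gap : List (Int × List (Int × Int × Int))) : List (Int × Int) :=
  gap.flatMap (fun e => e.2.map (fun q => q.2))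
    ++ prev.flatMap (fun e => e.2.flatMap (fun q => q.2.map (fun p => (p, e.1 - 1))))

-- number of universe slots not yet visited: the termination measure
def pvMu (prev : List (Int × List (Int × List Int)))
    (gap : List (Int × List (Int × Int × Int))) (v : List (Int × Int)) : Nat :=
  (pvU prev gap).countP (fun y => decide (y ∉ v))

theorem pvCountP_lt {α : Type} (p q : α → Bool) (h : ∀ a, p a = true → q a = true) :
    ∀ (L : List α) (a0 : α), a0 ∈ L → q a0 = true → p a0 = false →
      L.countP p < L.countP q := by
  intro L
  induction L with
  | nil => simp
  | cons a L ih =>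
    intro a0 hmem hq hp
    rcases List.mem_cons.1 hmem with rfl | hmem'
    · have hmono : L.countP p ≤ L.countP q := List.countP_mono_left (fun x _ => h x)
      simp [hp, hq]; omega
    · have := ih a0 hmem' hq hp
      by_cases hpa : p a = true
      · simp [hpa, h a hpa]; omega
      · simp only [List.countP_cons]
        have hq' : (if q a = true then 1 else 0) ≥ 0 := by positivity
        split_ifs <;> omega

theorem pvMu_mono (prev : List (Int × List (Int × List Int)))
    (gap : List (Int × List (Int × Int × Int))) (v v' : List (Int × Int))
    (h : ∀ x ∈ v, x ∈ v') : pvMu prev gap v' ≤ pvMu prev gap v := by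
  apply List.countP_mono_left
  intro a _ ha
  simp only [decide_eq_true_eq] at ha ⊢
  exact fun hv => ha (h a hv)

theorem pvMu_append_lt (prev : List (Int × List (Int × List Int)))
    (gap : List (Int × List (Int × Int × Int))) (v : List (Int × Int)) (y : Int × Int)
    (hyU : y ∈ pvU prev gap) (hyv : y ∉ v) :
    pvMu prev gap (v ++ [y]) < pvMu prev gap v := by
  apply pvCountP_lt
  · intro a ha
    simp only [decide_eq_true_eq, List.mem_append, List.mem_singleton] at ha ⊢
    exact fun hv => ha (Or.inl hv)
  · exact hyU
  · simpa using hyv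
  · simp

theorem pvMu_add_lt (prev : List (Int × List (Int × List Int)))
    (gap : List (Int × List (Int × Int × Int))) (v : PySem.Set (Int × Int)) (y : Int × Int)
    (hyU : y ∈ pvU prev gap) (hyv : y ∉ v) :
    pvMu prev gap (PySem.Set.add v y) < pvMu prev gap v := by
  rw [PySem.Set.add_of_not_mem hyv]
  exact pvMu_append_lt prev gap v y hyU hyv

theorem pvMu_lt_fuel (prev : List (Int × List (Int × List Int)))
    (gap : List (Int × List (Int × Int × Int))) (v : List (Int × Int)) :
    pvMu prev gap v < pvFuel prev gap := by
  have h1 : pvMu prev gap v ≤ (pvU prev gap).length := List.countP_le_length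
  have h2 : (pvU prev gap).length
      = (gap.map (fun p => p.2.length)).sum
        + (prev.map (fun p => (p.2.map (fun q => q.2.length)).sum)).sum := by
    simp [pvU, List.length_flatMap]
  unfold pvFuel
  omega

theorem pvSuccs_mem_U (t : Int) (prev : List (Int × List (Int × List Int)))
    (gap : List (Int × List (Int × Int × Int))) (x y : Int × Int)
    (h : y ∈ pvSuccs t prev gap x) : y ∈ pvU prev gap := by
  unfold pvSuccs at h
  split_ifs at h with hle
  · simp at h
  · rcases hg : ((PySem.Dict.mk gap).get? x.2).bind (fun gd => (PySem.Dict.mk gd).get? x.1) with _ | lf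
    · rw [hg] at h
      rcases hp : ((PySem.Dict.mk prev).get? x.2).bind (fun pd => (PySem.Dict.mk pd).get? x.1) with _ | lst
      · rw [hp] at h; simp at h
      · rw [hp] at h
        have h' : y ∈ lst.map (fun p => (p, x.2 - 1)) := h
        obtain ⟨p, hpmem, hpy⟩ := List.mem_map.1 h'
        obtain ⟨pd, hpd, hlst⟩ := Option.bind_eq_some_iff.1 hp
        have h1 : (x.2, pd) ∈ prev := PySem.Dict.mem_items_of_get?_eq_some _ hpd
        have h2 : (x.1, lst) ∈ pd := PySem.Dict.mem_items_of_get?_eq_some _ hlst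
        unfold pvU
        refine List.mem_append.2 (Or.inr ?_)
        refine List.mem_flatMap.2 ⟨(x.2, pd), h1, ?_⟩
        refine List.mem_flatMap.2 ⟨(x.1, lst), h2, ?_⟩
        exact List.mem_map.2 ⟨p, hpmem, hpy⟩
    · rw [hg] at h
      have h' : y ∈ (if t ≤ lf.2 then [lf] else []) := h
      split_ifs at h' with hcond
      · have hy : y = lf := by simpa using h'
        subst hy
        obtain ⟨gd, hgd, hlf⟩ := Option.bind_eq_some_iff.1 hg
        have h1 : (x.2, gd) ∈ gap := PySem.Dict.mem_items_of_get?_eq_some _ hgd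
        have h2 : (x.1, y) ∈ gd := PySem.Dict.mem_items_of_get?_eq_some _ hlf
        unfold pvU
        refine List.mem_append.2 (Or.inl ?_)
        exact List.mem_flatMap.2 ⟨(x.2, gd), h1, List.mem_map.2 ⟨(x.1, y), h2, rfl⟩⟩
      · simp at h'

theorem pvReach_mem (t : Int) (prev : List (Int × List (Int × List Int)))
    (gap : List (Int × List (Int × Int × Int))) (v : List (Int × Int))
    (hcl : ∀ y ∈ v, ∀ z ∈ pvSuccs t prev gap y, z ∈ v)
    (s x : Int × Int) (hs : s ∈ v) (h : pvReach t prev gap s x) : x ∈ v := by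
  induction h with
  | refl => exact hs
  | tail _ hstep ih => exact hcl _ ih _ hstep

-- the fold's accumulator list only grows at the back, independently of its start value
theorem pvExpand_cons (f p : Int) (lst : List Int) (v : PySem.Set (Int × Int))
    (a : List (Int × Int)) :
    pvAExpandPrev f (p :: lst) v a =
      if (p, f - 1) ∈ v then pvAExpandPrev f lst v a
      else pvAExpandPrev f lst (PySem.Set.add v (p, f - 1)) (a ++ [(p, f - 1)]) := by
  by_cases h : (p, f - 1) ∈ v <;> simp [pvAExpandPrev, h]

theorem pvExpand_acc (f : Int) (lst : List Int) (v : PySem.Set (Int × Int))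
    (a : List (Int × Int)) :
    (pvAExpandPrev f lst v a).1 = (pvAExpandPrev f lst v []).1 ∧
      (pvAExpandPrev f lst v a).2 = a ++ (pvAExpandPrev f lst v []).2 := by
  induction lst generalizing v a with
  | nil => simp [pvAExpandPrev]
  | cons p lst ih =>
    rw [pvExpand_cons, pvExpand_cons]
    by_cases h : (p, f - 1) ∈ v
    · simp only [if_pos h]; exact ih v a
    · simp only [if_neg h, List.nil_append]
      obtain ⟨h1, h2⟩ := ih (PySem.Set.add v (p, f - 1)) (a ++ [(p, f - 1)])
      obtain ⟨h1', h2'⟩ := ih (PySem.Set.add v (p, f - 1)) [(p, f - 1)]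
      exact ⟨h1.trans h1'.symm, by rw [h2, h2', List.append_assoc]⟩

-- the visited set grows exactly by the discovered queue suffix
theorem pvExpand_fst (f : Int) (lst : List Int) (v : PySem.Set (Int × Int)) :
    (pvAExpandPrev f lst v []).1 = v ++ (pvAExpandPrev f lst v []).2 := by
  induction lst generalizing v with
  | nil => simp [pvAExpandPrev]
  | cons p lst ih =>
    rw [pvExpand_cons]
    by_cases h : (p, f - 1) ∈ v
    · simpa [h] using ih v
    · simp only [if_neg h, List.nil_append]
      obtain ⟨h1, h2⟩ := pvExpand_acc f lst (PySem.Set.add v (p, f - 1)) [(p, f - 1)]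
      rw [h1, h2, ih (PySem.Set.add v (p, f - 1)), PySem.Set.add_of_not_mem h]
      simp

-- every discovered node comes from the prev list
theorem pvExpand_new_shape (f : Int) (lst : List Int) (v : PySem.Set (Int × Int)) :
    ∀ x ∈ (pvAExpandPrev f lst v []).2, ∃ p ∈ lst, x = (p, f - 1) := by
  induction lst generalizing v with
  | nil => simp [pvAExpandPrev]
  | cons p lst ih =>
    rw [pvExpand_cons]
    by_cases h : (p, f - 1) ∈ v
    · simp only [if_pos h]
      intro x hx
      obtain ⟨p', hp', hx'⟩ := ih v x hx
      exact ⟨p', List.mem_cons_of_mem _ hp', hx'⟩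
    · simp only [if_neg h, List.nil_append]
      intro x hx
      rw [(pvExpand_acc f lst (PySem.Set.add v (p, f - 1)) [(p, f - 1)]).2] at hx
      rcases List.mem_append.1 hx with hx1 | hx2
      · exact ⟨p, List.mem_cons_self .., by simpa using hx1⟩
      · obtain ⟨p', hp', hx'⟩ := ih (PySem.Set.add v (p, f - 1)) x hx2
        exact ⟨p', List.mem_cons_of_mem _ hp', hx'⟩

-- every prev-list child ends up visited
theorem pvExpand_children (f : Int) (lst : List Int) (v : PySem.Set (Int × Int)) :
    ∀ p ∈ lst, (p, f - 1) ∈ (pvAExpandPrev f lst v []).1 := by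
  induction lst generalizing v with
  | nil => simp
  | cons p lst ih =>
    intro p' hp'
    rw [pvExpand_cons]
    rcases List.mem_cons.1 hp' with rfl | hmem
    · by_cases h : (p', f - 1) ∈ v
      · simp only [if_pos h]
        rw [pvExpand_fst]
        exact List.mem_append.2 (Or.inl h)
      · simp only [if_neg h, List.nil_append]
        rw [(pvExpand_acc f lst (PySem.Set.add v (p', f - 1)) [(p', f - 1)]).1,
          pvExpand_fst]
        refine List.mem_append.2 (Or.inl ?_)
        simp [PySem.Set.mem_add]
    · by_cases h : (p, f - 1) ∈ v
      · simp only [if_pos h]; exact ih v p' hmem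
      · simp only [if_neg h, List.nil_append]
        rw [(pvExpand_acc f lst (PySem.Set.add v (p, f - 1)) [(p, f - 1)]).1]
        exact ih (PySem.Set.add v (p, f - 1)) p' hmem

-- the measure accounting of the fold: one fresh universe slot per discovered node
theorem pvExpand_mu (prev : List (Int × List (Int × List Int)))
    (gap : List (Int × List (Int × Int × Int))) (f : Int) (lst : List Int)
    (v : PySem.Set (Int × Int)) (q : List (Int × Int))
    (hU : ∀ p ∈ lst, ((p : Int), f - 1) ∈ pvU prev gap) :
    pvMu prev gap (pvAExpandPrev f lst v q).1 + (pvAExpandPrev f lst v q).2.length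
      ≤ pvMu prev gap v + q.length := by
  induction lst generalizing v q with
  | nil => simp [pvAExpandPrev]
  | cons p lst ih =>
    rw [pvExpand_cons]
    by_cases h : (p, f - 1) ∈ v
    · simp only [if_pos h]
      exact ih v q (fun p' hp' => hU p' (List.mem_cons_of_mem _ hp'))
    · simp only [if_neg h]
      have hlt := pvMu_add_lt prev gap v (p, f - 1) (hU p (List.mem_cons_self ..)) h
      have := ih (PySem.Set.add v (p, f - 1)) (q ++ [(p, f - 1)])
        (fun p' hp' => hU p' (List.mem_cons_of_mem _ hp'))
      simp only [List.length_append, List.length_singleton] at this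
      omega

-- evaluation lemmas for the successor list
theorem pvSuccs_of_le (t : Int) (prev : List (Int × List (Int × List Int)))
    (gap : List (Int × List (Int × Int × Int))) (l0 f0 : Int) (hle : f0 ≤ t) :
    pvSuccs t prev gap (l0, f0) = [] := by
  unfold pvSuccs
  exact if_pos hle

theorem pvSuccs_of_gt (t : Int) (prev : List (Int × List (Int × List Int)))
    (gap : List (Int × List (Int × Int × Int))) (l0 f0 : Int) (hgt : t < f0) :
    pvSuccs t prev gap (l0, f0) =
      match ((PySem.Dict.mk gap).get? f0).bind (fun gd => (PySem.Dict.mk gd).get? l0) with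
      | some lf => if t ≤ lf.2 then [lf] else []
      | none =>
        match ((PySem.Dict.mk prev).get? f0).bind (fun pd => (PySem.Dict.mk pd).get? l0) with
        | some lst => lst.map (fun p => (p, f0 - 1))
        | none => [] := by
  unfold pvSuccs
  exact if_neg (not_le.mpr hgt)

-- ===== the BFS loop of A computes exactly the labels whose target node is reachable =====
theorem pvALoop_chr (t : Int) (prev : List (Int × List (Int × List Int)))
    (gap : List (Int × List (Int × Int × Int))) :
    ∀ (fuel : Nat) (w : List (Int × Int)) (v : PySem.Set (Int × Int)) (r : PySem.Set Int),
      (∀ x ∈ w, x ∈ v) →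
      (∀ x ∈ v, x ∉ w → ∀ y ∈ pvSuccs t prev gap x, y ∈ v) →
      (∀ l ∈ r, ((l : Int), t) ∈ v) →
      (∀ x ∈ v, x.2 = t → x ∈ w ∨ x.1 ∈ r) →
      pvMu prev gap v + w.length ≤ fuel →
      ∀ l, l ∈ pvALoop t prev gap fuel w v r ↔ ∃ s ∈ v, pvReach t prev gap s (l, t) := by
  intro fuel
  induction fuel with
  | zero =>
    intro w v r hwv hexp hrv htv hfuel l
    have hw : w = [] := by cases w with | nil => rfl | cons a w => simp at hfuel
    subst hw
    show l ∈ r ↔ _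
    constructor
    · intro hl; exact ⟨(l, t), hrv l hl, Relation.ReflTransGen.refl⟩
    · rintro ⟨s, hs, hreach⟩
      have hcl : ∀ y ∈ v, ∀ z ∈ pvSuccs t prev gap y, z ∈ v :=
        fun y hy => hexp y hy (by simp)
      have hmem := pvReach_mem t prev gap v hcl s (l, t) hs hreach
      rcases htv _ hmem rfl with h | h
      · simp at h
      · exact h
  | succ fuel ih =>
    intro w v r hwv hexp hrv htv hfuel l
    cases w with
    | nil =>
      show l ∈ r ↔ _
      constructor
      · intro hl; exact ⟨(l, t), hrv l hl, Relation.ReflTransGen.refl⟩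
      · rintro ⟨s, hs, hreach⟩
        have hcl : ∀ y ∈ v, ∀ z ∈ pvSuccs t prev gap y, z ∈ v :=
          fun y hy => hexp y hy (by simp)
        have hmem := pvReach_mem t prev gap v hcl s (l, t) hs hreach
        rcases htv _ hmem rfl with h | h
        · simp at h
        · exact h
    | cons hd qs =>
      obtain ⟨l0, f0⟩ := hd
      have hhead : (l0, f0) ∈ v := hwv _ (List.mem_cons_self ..)
      simp only [List.length_cons] at hfuel
      rw [pvALoop]
      by_cases hft : f0 = t
      · rw [if_pos hft]
        refine ih qs v (PySem.Set.add r l0) ?_ ?_ ?_ ?_ ?_ l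
        · exact fun x hx => hwv x (List.mem_cons_of_mem _ hx)
        · intro x hxv hxw y hy
          by_cases hx0 : x = (l0, f0)
          · subst hx0
            rw [pvSuccs_of_le t prev gap l0 f0 (le_of_eq hft)] at hy
            simp at hy
          · exact hexp x hxv (by simp [hxw, hx0]) y hy
        · intro l' hl'
          rcases (PySem.Set.mem_add _ _ _).1 hl' with h | rfl
          · exact hrv l' h
          · rw [← hft]; exact hhead
        · intro x hxv hx2
          rcases htv x hxv hx2 with hxw | hxr
          · rcases List.mem_cons.1 hxw with rfl | hxqs
            · exact Or.inr ((PySem.Set.mem_add _ _ _).2 (Or.inr rfl))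
            · exact Or.inl hxqs
          · exact Or.inr ((PySem.Set.mem_add _ _ _).2 (Or.inl hxr))
        · omega
      · rw [if_neg hft]
        by_cases hlt : f0 < t
        · rw [if_pos hlt]
          refine ih qs v r ?_ ?_ hrv ?_ ?_ l
          · exact fun x hx => hwv x (List.mem_cons_of_mem _ hx)
          · intro x hxv hxw y hy
            by_cases hx0 : x = (l0, f0)
            · subst hx0
              rw [pvSuccs_of_le t prev gap l0 f0 (le_of_lt hlt)] at hy
              simp at hy
            · exact hexp x hxv (by simp [hxw, hx0]) y hy
          · intro x hxv hx2
            rcases htv x hxv hx2 with hxw | hxr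
            · rcases List.mem_cons.1 hxw with rfl | hxqs
              · exact absurd hx2 hft
              · exact Or.inl hxqs
            · exact Or.inr hxr
          · omega
        · rw [if_neg hlt]
          have hgt : t < f0 := by omega
          rcases hg : ((PySem.Dict.mk gap).get? f0).bind (fun gd => (PySem.Dict.mk gd).get? l0)
            with _ | lf
          · rcases hp : ((PySem.Dict.mk prev).get? f0).bind (fun pd => (PySem.Dict.mk pd).get? l0)
              with _ | lst
            · have hsuccs : pvSuccs t prev gap (l0, f0) = [] := by
                rw [pvSuccs_of_gt t prev gap l0 f0 hgt, hg, hp]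
              refine ih qs v r ?_ ?_ hrv ?_ ?_ l
              · exact fun x hx => hwv x (List.mem_cons_of_mem _ hx)
              · intro x hxv hxw y hy
                by_cases hx0 : x = (l0, f0)
                · subst hx0; rw [hsuccs] at hy; simp at hy
                · exact hexp x hxv (by simp [hxw, hx0]) y hy
              · intro x hxv hx2
                rcases htv x hxv hx2 with hxw | hxr
                · rcases List.mem_cons.1 hxw with rfl | hxqs
                  · exact absurd hx2 hft
                  · exact Or.inl hxqs
                · exact Or.inr hxr
              · omega
            · have hsuccs : pvSuccs t prev gap (l0, f0) = lst.map (fun p => (p, f0 - 1)) := by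
                rw [pvSuccs_of_gt t prev gap l0 f0 hgt, hg, hp]
              have hU : ∀ p ∈ lst, ((p : Int), f0 - 1) ∈ pvU prev gap := by
                intro p hpmem
                exact pvSuccs_mem_U t prev gap (l0, f0) _
                  (by rw [hsuccs]; exact List.mem_map.2 ⟨p, hpmem, rfl⟩)
              have hacc := pvExpand_acc f0 lst v qs
              have hfst : (pvAExpandPrev f0 lst v qs).1 = v ++ (pvAExpandPrev f0 lst v []).2 := by
                rw [hacc.1, pvExpand_fst]
              have hshape := pvExpand_new_shape f0 lst v
              have hchild : ∀ p ∈ lst, ((p : Int), f0 - 1) ∈ (pvAExpandPrev f0 lst v qs).1 := by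
                intro p hpmem; rw [hacc.1]; exact pvExpand_children f0 lst v p hpmem
              have hstepnew : ∀ x ∈ (pvAExpandPrev f0 lst v []).2,
                  pvStep t prev gap (l0, f0) x := by
                intro x hx
                obtain ⟨p, hpmem, rfl⟩ := hshape x hx
                unfold pvStep
                rw [hsuccs]
                exact List.mem_map.2 ⟨p, hpmem, rfl⟩
              refine (ih (pvAExpandPrev f0 lst v qs).2 (pvAExpandPrev f0 lst v qs).1 r
                ?_ ?_ ?_ ?_ ?_ l).trans ?_
              · intro x hx
                rw [hacc.2] at hx
                rw [hfst]
                rcases List.mem_append.1 hx with hx1 | hx2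
                · exact List.mem_append.2 (Or.inl (hwv x (List.mem_cons_of_mem _ hx1)))
                · exact List.mem_append.2 (Or.inr hx2)
              · intro x hxv hxw y hy
                rw [hfst] at hxv
                rcases List.mem_append.1 hxv with hxv | hxnew
                · by_cases hx0 : x = (l0, f0)
                  · subst hx0
                    rw [hsuccs] at hy
                    obtain ⟨p, hpmem, rfl⟩ := List.mem_map.1 hy
                    exact hchild p hpmem
                  · have hxnotw : x ∉ (l0, f0) :: qs := by
                      simp only [List.mem_cons, not_or]
                      refine ⟨hx0, fun hxqs => hxw ?_⟩
                      rw [hacc.2]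
                      exact List.mem_append.2 (Or.inl hxqs)
                    have := hexp x hxv hxnotw y hy
                    rw [hfst]; exact List.mem_append.2 (Or.inl this)
                · exact absurd (by rw [hacc.2]; exact List.mem_append.2 (Or.inr hxnew)) hxw
              · intro l' hl'
                rw [hfst]; exact List.mem_append.2 (Or.inl (hrv l' hl'))
              · intro x hxv hx2
                rw [hfst] at hxv
                rcases List.mem_append.1 hxv with hxv | hxnew
                · rcases htv x hxv hx2 with hxw | hxr
                  · rcases List.mem_cons.1 hxw with rfl | hxqs
                    · exact absurd hx2 hft
                    · refine Or.inl ?_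
                      rw [hacc.2]; exact List.mem_append.2 (Or.inl hxqs)
                  · exact Or.inr hxr
                · refine Or.inl ?_
                  rw [hacc.2]; exact List.mem_append.2 (Or.inr hxnew)
              · have := pvExpand_mu prev gap f0 lst v qs hU
                omega
              · constructor
                · rintro ⟨y, hy, hre⟩
                  rw [hfst] at hy
                  rcases List.mem_append.1 hy with hyv | hynew
                  · exact ⟨y, hyv, hre⟩
                  · exact ⟨(l0, f0), hhead,
                      Relation.ReflTransGen.head (hstepnew y hynew) hre⟩
                · rintro ⟨y, hy, hre⟩
                  exact ⟨y, by rw [hfst]; exact List.mem_append.2 (Or.inl hy), hre⟩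
          · have hsIf : pvSuccs t prev gap (l0, f0) = if t ≤ lf.2 then [lf] else [] := by
              rw [pvSuccs_of_gt t prev gap l0 f0 hgt, hg]
            show (l ∈ if t ≤ lf.2 ∧ lf ∉ v then pvALoop t prev gap fuel (qs ++ [lf]) (PySem.Set.add v lf) r
                else pvALoop t prev gap fuel qs v r) ↔ ∃ s ∈ v, pvReach t prev gap s (l, t)
            by_cases hcond : t ≤ lf.2 ∧ lf ∉ v
            · rw [if_pos hcond]
              have hsuccs : pvSuccs t prev gap (l0, f0) = [lf] := by
                rw [hsIf, if_pos hcond.1]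
              have hstep : pvStep t prev gap (l0, f0) lf := by
                unfold pvStep; rw [hsuccs]; exact List.mem_singleton.2 rfl
              have hUlf : lf ∈ pvU prev gap :=
                pvSuccs_mem_U t prev gap (l0, f0) lf (by rw [hsuccs]; simp)
              refine (ih (qs ++ [lf]) (PySem.Set.add v lf) r ?_ ?_ ?_ ?_ ?_ l).trans ?_
              · intro x hx
                rcases List.mem_append.1 hx with hx1 | hx2
                · exact (PySem.Set.mem_add _ _ _).2
                    (Or.inl (hwv x (List.mem_cons_of_mem _ hx1)))
                · exact (PySem.Set.mem_add _ _ _).2 (Or.inr (by simpa using hx2))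
              · intro x hxv hxw y hy
                rcases (PySem.Set.mem_add _ _ _).1 hxv with hxv | rfl
                · by_cases hx0 : x = (l0, f0)
                  · subst hx0
                    rw [hsuccs] at hy
                    have hylf : y = lf := by simpa using hy
                    subst hylf
                    exact (PySem.Set.mem_add _ _ _).2 (Or.inr rfl)
                  · have hxnotw : x ∉ (l0, f0) :: qs := by
                      simp only [List.mem_cons, not_or]
                      exact ⟨hx0, fun hxqs => hxw (List.mem_append.2 (Or.inl hxqs))⟩
                    exact (PySem.Set.mem_add _ _ _).2 (Or.inl (hexp x hxv hxnotw y hy))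
                · exact absurd (List.mem_append.2 (Or.inr (by simp))) hxw
              · intro l' hl'
                exact (PySem.Set.mem_add _ _ _).2 (Or.inl (hrv l' hl'))
              · intro x hxv hx2
                rcases (PySem.Set.mem_add _ _ _).1 hxv with hxv | rfl
                · rcases htv x hxv hx2 with hxw | hxr
                  · rcases List.mem_cons.1 hxw with rfl | hxqs
                    · exact absurd hx2 hft
                    · exact Or.inl (List.mem_append.2 (Or.inl hxqs))
                  · exact Or.inr hxr
                · exact Or.inl (List.mem_append.2 (Or.inr (by simp)))
              · have := pvMu_add_lt prev gap v lf hUlf hcond.2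
                simp only [List.length_append, List.length_singleton]
                omega
              · constructor
                · rintro ⟨y, hy, hre⟩
                  rcases (PySem.Set.mem_add _ _ _).1 hy with hyv | rfl
                  · exact ⟨y, hyv, hre⟩
                  · exact ⟨(l0, f0), hhead, Relation.ReflTransGen.head hstep hre⟩
                · rintro ⟨y, hy, hre⟩
                  exact ⟨y, (PySem.Set.mem_add _ _ _).2 (Or.inl hy), hre⟩
            · rw [if_neg hcond]
              refine ih qs v r ?_ ?_ hrv ?_ ?_ l
              · exact fun x hx => hwv x (List.mem_cons_of_mem _ hx)
              · intro x hxv hxw y hy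
                by_cases hx0 : x = (l0, f0)
                · subst hx0
                  rw [hsIf] at hy
                  split_ifs at hy with hc2
                  · have hylf : y = lf := by simpa using hy
                    subst hylf
                    rcases not_and_or.1 hcond with hc | hc
                    · exact absurd hc2 hc
                    · simpa using hc
                  · simp at hy
                · exact hexp x hxv (by simp [hxw, hx0]) y hy
              · intro x hxv hx2
                rcases htv x hxv hx2 with hxw | hxr
                · rcases List.mem_cons.1 hxw with rfl | hxqs
                  · exact absurd hx2 hft
                  · exact Or.inl hxqs
                · exact Or.inr hxr
              · omega

-- ===== the DFS recursion of B visits exactly the reachable fresh nodes =====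
theorem pvBVisit_chr (t : Int) (prev : List (Int × List (Int × List Int)))
    (gap : List (Int × List (Int × Int × Int))) :
    ∀ (fuel : Nat) (l f : Int) (vis : PySem.Set (Int × Int)) (res : List Int),
      (l, f) ∈ vis →
      pvMu prev gap vis < fuel →
      (∀ x ∈ vis, x ∈ (pvBVisit t prev gap fuel l f (vis, res)).1) ∧
      (∀ y ∈ (pvBVisit t prev gap fuel l f (vis, res)).1, y ∉ vis →
        pvReach t prev gap (l, f) y) ∧
      (∀ z ∈ pvSuccs t prev gap (l, f), z ∈ (pvBVisit t prev gap fuel l f (vis, res)).1) ∧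
      (∀ y ∈ (pvBVisit t prev gap fuel l f (vis, res)).1, y ∉ vis →
        ∀ z ∈ pvSuccs t prev gap y, z ∈ (pvBVisit t prev gap fuel l f (vis, res)).1) ∧
      (∀ l' : Int, l' ∈ (pvBVisit t prev gap fuel l f (vis, res)).2 ↔
        l' ∈ res ∨ ((l', t) = (l, f) ∨
          ((l', t) ∈ (pvBVisit t prev gap fuel l f (vis, res)).1 ∧ (l', t) ∉ vis))) := by
  intro fuel
  induction fuel with
  | zero =>
    intro l f vis res hmem hfuel
    exact absurd hfuel (Nat.not_lt_zero _)
  | succ fuel ih =>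
    intro l f vis res hmem hfuel
    by_cases hft : f = t
    · have heq : pvBVisit t prev gap (fuel + 1) l f (vis, res) = (vis, res ++ [l]) := by
        rw [pvBVisit, if_pos hft]
      rw [heq]
      refine ⟨fun x hx => hx, fun y hy hyn => absurd hy hyn, ?_, fun y hy hyn => absurd hy hyn, ?_⟩
      · rw [pvSuccs_of_le t prev gap l f (le_of_eq hft)]; simp
      · intro l'
        constructor
        · intro h
          rcases List.mem_append.1 h with h | h
          · exact Or.inl h
          · refine Or.inr (Or.inl ?_)
            have : l' = l := by simpa using h
            rw [this, hft]
        · rintro (h | h | ⟨h1, h2⟩)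
          · exact List.mem_append.2 (Or.inl h)
          · refine List.mem_append.2 (Or.inr ?_)
            have : l' = l := congrArg Prod.fst h
            simp [this]
          · exact absurd h1 h2
    · by_cases hlt : f < t
      · have heq : pvBVisit t prev gap (fuel + 1) l f (vis, res) = (vis, res) := by
          rw [pvBVisit, if_neg hft, if_pos hlt]
        rw [heq]
        refine ⟨fun x hx => hx, fun y hy hyn => absurd hy hyn, ?_, fun y hy hyn => absurd hy hyn, ?_⟩
        · rw [pvSuccs_of_le t prev gap l f (le_of_lt hlt)]; simp
        · intro l'
          constructor
          · exact fun h => Or.inl h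
          · rintro (h | h | ⟨h1, h2⟩)
            · exact h
            · exact absurd (congrArg Prod.snd h).symm hlt.ne
            · exact absurd h1 h2
      · have hgt : t < f := by omega
        rcases hg : ((PySem.Dict.mk gap).get? f).bind (fun gd => (PySem.Dict.mk gd).get? l)
          with _ | lf
        · rcases hp : ((PySem.Dict.mk prev).get? f).bind (fun pd => (PySem.Dict.mk pd).get? l)
            with _ | lst
          · have hsuccs : pvSuccs t prev gap (l, f) = [] := by
              rw [pvSuccs_of_gt t prev gap l f hgt, hg, hp]
            have heq : pvBVisit t prev gap (fuel + 1) l f (vis, res) = (vis, res) := by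
              rw [pvBVisit, if_neg hft, if_neg hlt, hg, hp]
            rw [heq]
            refine ⟨fun x hx => hx, fun y hy hyn => absurd hy hyn, ?_,
              fun y hy hyn => absurd hy hyn, ?_⟩
            · rw [hsuccs]; simp
            · intro l'
              constructor
              · exact fun h => Or.inl h
              · rintro (h | h | ⟨h1, h2⟩)
                · exact h
                · exact absurd (congrArg Prod.snd h).symm hft
                · exact absurd h1 h2
          · -- prev links: the recursion over the children list
            have hsuccs : pvSuccs t prev gap (l, f) = lst.map (fun p => (p, f - 1)) := by
              rw [pvSuccs_of_gt t prev gap l f hgt, hg, hp]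
            have heq : pvBVisit t prev gap (fuel + 1) l f (vis, res) =
                lst.foldl (fun s2 p =>
                  if (p, f - 1) ∈ s2.1 then s2
                  else pvBVisit t prev gap fuel p (f - 1)
                    (PySem.Set.add s2.1 (p, f - 1), s2.2)) (vis, res) := by
              rw [pvBVisit, if_neg hft, if_neg hlt, hg, hp]
            rw [heq]
            have inner : ∀ (L : List Int),
                (∀ p ∈ L, ((p : Int), f - 1) ∈ pvSuccs t prev gap (l, f)) →
                ∀ (vis' : PySem.Set (Int × Int)) (res' : List Int),
                pvMu prev gap vis' ≤ fuel →
                (∀ x ∈ vis', x ∈ (L.foldl (fun s2 p =>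
                  if (p, f - 1) ∈ s2.1 then s2
                  else pvBVisit t prev gap fuel p (f - 1)
                    (PySem.Set.add s2.1 (p, f - 1), s2.2)) (vis', res')).1) ∧
                (∀ y ∈ (L.foldl (fun s2 p =>
                  if (p, f - 1) ∈ s2.1 then s2
                  else pvBVisit t prev gap fuel p (f - 1)
                    (PySem.Set.add s2.1 (p, f - 1), s2.2)) (vis', res')).1, y ∉ vis' →
                  pvReach t prev gap (l, f) y) ∧
                (∀ p ∈ L, ((p : Int), f - 1) ∈ (L.foldl (fun s2 p =>
                  if (p, f - 1) ∈ s2.1 then s2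
                  else pvBVisit t prev gap fuel p (f - 1)
                    (PySem.Set.add s2.1 (p, f - 1), s2.2)) (vis', res')).1) ∧
                (∀ y ∈ (L.foldl (fun s2 p =>
                  if (p, f - 1) ∈ s2.1 then s2
                  else pvBVisit t prev gap fuel p (f - 1)
                    (PySem.Set.add s2.1 (p, f - 1), s2.2)) (vis', res')).1, y ∉ vis' →
                  ∀ z ∈ pvSuccs t prev gap y, z ∈ (L.foldl (fun s2 p =>
                  if (p, f - 1) ∈ s2.1 then s2
                  else pvBVisit t prev gap fuel p (f - 1)
                    (PySem.Set.add s2.1 (p, f - 1), s2.2)) (vis', res')).1) ∧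
                (∀ l' : Int, l' ∈ (L.foldl (fun s2 p =>
                  if (p, f - 1) ∈ s2.1 then s2
                  else pvBVisit t prev gap fuel p (f - 1)
                    (PySem.Set.add s2.1 (p, f - 1), s2.2)) (vis', res')).2 ↔
                  l' ∈ res' ∨ ((l', t) ∈ (L.foldl (fun s2 p =>
                  if (p, f - 1) ∈ s2.1 then s2
                  else pvBVisit t prev gap fuel p (f - 1)
                    (PySem.Set.add s2.1 (p, f - 1), s2.2)) (vis', res')).1 ∧ (l', t) ∉ vis')) := by
              intro L
              induction L with
              | nil =>
                intro _ vis' res' _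
                refine ⟨fun x hx => hx, fun y hy hyn => absurd hy hyn, by simp,
                  fun y hy hyn => absurd hy hyn, ?_⟩
                intro l'
                constructor
                · exact fun h => Or.inl h
                · rintro (h | ⟨h1, h2⟩)
                  · exact h
                  · exact absurd h1 h2
              | cons p L ihL =>
                intro hUL vis' res' hmu'
                simp only [List.foldl_cons]
                by_cases hpmem : (p, f - 1) ∈ vis'
                · rw [if_pos hpmem]
                  obtain ⟨d1, d2, d3, d4, d5⟩ :=
                    ihL (fun p' hp' => hUL p' (List.mem_cons_of_mem _ hp')) vis' res' hmu'
                  refine ⟨d1, d2, ?_, d4, d5⟩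
                  intro p' hp'
                  rcases List.mem_cons.1 hp' with rfl | hp''
                  · exact d1 _ hpmem
                  · exact d3 p' hp''
                · rw [if_neg hpmem]
                  have hq : ((p : Int), f - 1) ∈ pvSuccs t prev gap (l, f) :=
                    hUL p (List.mem_cons_self ..)
                  have hstepq : pvStep t prev gap (l, f) (p, f - 1) := hq
                  have hqU : ((p : Int), f - 1) ∈ pvU prev gap :=
                    pvSuccs_mem_U t prev gap (l, f) _ hq
                  have hmu2 : pvMu prev gap (PySem.Set.add vis' (p, f - 1)) < fuel :=
                    lt_of_lt_of_le (pvMu_add_lt prev gap vis' (p, f - 1) hqU hpmem) hmu'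
                  obtain ⟨c1, c2, c3, c4, c5⟩ :=
                    ih p (f - 1) (PySem.Set.add vis' (p, f - 1)) res'
                      ((PySem.Set.mem_add _ _ _).2 (Or.inr rfl)) hmu2
                  set C := pvBVisit t prev gap fuel p (f - 1)
                    (PySem.Set.add vis' (p, f - 1), res') with hC
                  have hvisC : ∀ x ∈ vis', x ∈ C.1 :=
                    fun x hx => c1 x ((PySem.Set.mem_add _ _ _).2 (Or.inl hx))
                  have hqC : ((p : Int), f - 1) ∈ C.1 :=
                    c1 _ ((PySem.Set.mem_add _ _ _).2 (Or.inr rfl))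
                  have hmuC : pvMu prev gap C.1 ≤ fuel :=
                    le_trans (pvMu_mono prev gap _ _ (fun x hx => c1 x hx)) (le_of_lt hmu2)
                  obtain ⟨d1, d2, d3, d4, d5⟩ :=
                    ihL (fun p' hp' => hUL p' (List.mem_cons_of_mem _ hp')) C.1 C.2 hmuC
                  have hfoldC : ∀ x ∈ C.1, x ∈ (L.foldl (fun s2 p =>
                      if (p, f - 1) ∈ s2.1 then s2
                      else pvBVisit t prev gap fuel p (f - 1)
                        (PySem.Set.add s2.1 (p, f - 1), s2.2)) (C.1, C.2)).1 := d1
                  refine ⟨?_, ?_, ?_, ?_, ?_⟩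
                  · exact fun x hx => d1 x (hvisC x hx)
                  · intro y hy hyn
                    by_cases hyC : y ∈ C.1
                    · by_cases hy2 : y ∈ PySem.Set.add vis' (p, f - 1)
                      · have hyq : y = (p, f - 1) := by
                          rcases (PySem.Set.mem_add _ _ _).1 hy2 with h | h
                          · exact absurd h hyn
                          · exact h
                        rw [hyq]
                        exact Relation.ReflTransGen.single hstepq
                      · exact Relation.ReflTransGen.head hstepq (c2 y hyC hy2)
                    · exact d2 y hy hyC
                  · intro p' hp'
                    rcases List.mem_cons.1 hp' with rfl | hp''
                    · exact d1 _ hqC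
                    · exact d3 p' hp''
                  · intro y hy hyn z hz
                    by_cases hyC : y ∈ C.1
                    · by_cases hy2 : y ∈ PySem.Set.add vis' (p, f - 1)
                      · have hyq : y = (p, f - 1) := by
                          rcases (PySem.Set.mem_add _ _ _).1 hy2 with h | h
                          · exact absurd h hyn
                          · exact h
                        subst hyq
                        exact d1 _ (c3 z hz)
                      · exact d1 _ (c4 y hyC hy2 z hz)
                    · exact d4 y hy hyC z hz
                  · intro l'
                    constructor
                    · intro h
                      rcases (d5 l').1 h with h | ⟨h1, h2⟩
                      · rcases (c5 l').1 h with h | h | ⟨h1, h2⟩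
                        · exact Or.inl h
                        · refine Or.inr ⟨?_, ?_⟩
                          · rw [h]; exact d1 _ hqC
                          · rw [h]; exact hpmem
                        · refine Or.inr ⟨d1 _ h1, ?_⟩
                          exact fun hv => h2 ((PySem.Set.mem_add _ _ _).2 (Or.inl hv))
                      · exact Or.inr ⟨h1, fun hv => h2 (hvisC _ hv)⟩
                    · rintro (h | ⟨h1, h2⟩)
                      · exact (d5 l').2 (Or.inl ((c5 l').2 (Or.inl h)))
                      · by_cases hC1 : (l', t) ∈ C.1
                        · by_cases hA : (l', t) ∈ PySem.Set.add vis' (p, f - 1)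
                          · have : (l', t) = (p, f - 1) := by
                              rcases (PySem.Set.mem_add _ _ _).1 hA with h | h
                              · exact absurd h h2
                              · exact h
                            exact (d5 l').2 (Or.inl ((c5 l').2 (Or.inr (Or.inl this))))
                          · exact (d5 l').2 (Or.inl ((c5 l').2 (Or.inr (Or.inr ⟨hC1, hA⟩))))
                        · exact (d5 l').2 (Or.inr ⟨h1, hC1⟩)
            have hUL : ∀ p ∈ lst, ((p : Int), f - 1) ∈ pvSuccs t prev gap (l, f) := by
              intro p hpmem
              rw [hsuccs]
              exact List.mem_map.2 ⟨p, hpmem, rfl⟩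
            obtain ⟨i1, i2, i3, i4, i5⟩ := inner lst hUL vis res (by omega)
            refine ⟨i1, i2, ?_, i4, ?_⟩
            · intro z hz
              rw [hsuccs] at hz
              obtain ⟨p, hpmem, rfl⟩ := List.mem_map.1 hz
              exact i3 p hpmem
            · intro l'
              constructor
              · intro h
                rcases (i5 l').1 h with h | ⟨h1, h2⟩
                · exact Or.inl h
                · exact Or.inr (Or.inr ⟨h1, h2⟩)
              · rintro (h | h | ⟨h1, h2⟩)
                · exact (i5 l').2 (Or.inl h)
                · exact absurd (congrArg Prod.snd h).symm hft
                · exact (i5 l').2 (Or.inr ⟨h1, h2⟩)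
        · -- gap link
          have hsIf : pvSuccs t prev gap (l, f) = if t ≤ lf.2 then [lf] else [] := by
            rw [pvSuccs_of_gt t prev gap l f hgt, hg]
          by_cases hcond : t ≤ lf.2 ∧ lf ∉ vis
          · have hsuccs : pvSuccs t prev gap (l, f) = [lf] := by
              rw [hsIf, if_pos hcond.1]
            have hstep : pvStep t prev gap (l, f) lf := by
              unfold pvStep; rw [hsuccs]; exact List.mem_singleton.2 rfl
            have hUlf : lf ∈ pvU prev gap :=
              pvSuccs_mem_U t prev gap (l, f) lf (by rw [hsuccs]; simp)
            have heq : pvBVisit t prev gap (fuel + 1) l f (vis, res) =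
                pvBVisit t prev gap fuel lf.1 lf.2 (PySem.Set.add vis lf, res) := by
              rw [pvBVisit, if_neg hft, if_neg hlt, hg]
              exact if_pos hcond
            rw [heq]
            have hmu2 : pvMu prev gap (PySem.Set.add vis lf) < fuel :=
              lt_of_lt_of_le (pvMu_add_lt prev gap vis lf hUlf hcond.2) (by omega)
            obtain ⟨c1, c2, c3, c4, c5⟩ := ih lf.1 lf.2 (PySem.Set.add vis lf) res
              (by rw [Prod.mk.eta]; exact (PySem.Set.mem_add _ _ _).2 (Or.inr rfl)) hmu2
            have hvisC : ∀ x ∈ vis,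
                x ∈ (pvBVisit t prev gap fuel lf.1 lf.2 (PySem.Set.add vis lf, res)).1 :=
              fun x hx => c1 x ((PySem.Set.mem_add _ _ _).2 (Or.inl hx))
            have hlfC : lf ∈ (pvBVisit t prev gap fuel lf.1 lf.2 (PySem.Set.add vis lf, res)).1 :=
              c1 lf ((PySem.Set.mem_add _ _ _).2 (Or.inr rfl))
            refine ⟨hvisC, ?_, ?_, ?_, ?_⟩
            · intro y hy hyn
              by_cases hy2 : y ∈ PySem.Set.add vis lf
              · have hylf : y = lf := by
                  rcases (PySem.Set.mem_add _ _ _).1 hy2 with h | h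
                  · exact absurd h hyn
                  · exact h
                rw [hylf]
                exact Relation.ReflTransGen.single hstep
              · refine Relation.ReflTransGen.head hstep ?_
                have := c2 y hy hy2
                rwa [Prod.mk.eta] at this
            · intro z hz
              rw [hsuccs] at hz
              have : z = lf := by simpa using hz
              rw [this]; exact hlfC
            · intro y hy hyn z hz
              by_cases hy2 : y ∈ PySem.Set.add vis lf
              · have hylf : y = lf := by
                  rcases (PySem.Set.mem_add _ _ _).1 hy2 with h | h
                  · exact absurd h hyn
                  · exact h
                subst hylf
                refine c3 z ?_
                rwa [Prod.mk.eta]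
              · exact c4 y hy hy2 z hz
            · intro l'
              constructor
              · intro h
                rcases (c5 l').1 h with h | h | ⟨h1, h2⟩
                · exact Or.inl h
                · rw [Prod.mk.eta] at h
                  refine Or.inr (Or.inr ⟨?_, ?_⟩)
                  · rw [h]; exact hlfC
                  · rw [h]; exact hcond.2
                · refine Or.inr (Or.inr ⟨h1, ?_⟩)
                  exact fun hv => h2 ((PySem.Set.mem_add _ _ _).2 (Or.inl hv))
              · rintro (h | h | ⟨h1, h2⟩)
                · exact (c5 l').2 (Or.inl h)
                · exact absurd (congrArg Prod.snd h).symm hft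
                · by_cases hA : (l', t) ∈ PySem.Set.add vis lf
                  · have : (l', t) = lf := by
                      rcases (PySem.Set.mem_add _ _ _).1 hA with h | h
                      · exact absurd h h2
                      · exact h
                    refine (c5 l').2 (Or.inr (Or.inl ?_))
                    rw [Prod.mk.eta]
                    exact this
                  · exact (c5 l').2 (Or.inr (Or.inr ⟨h1, hA⟩))
          · have heq : pvBVisit t prev gap (fuel + 1) l f (vis, res) = (vis, res) := by
              rw [pvBVisit, if_neg hft, if_neg hlt, hg]
              exact if_neg hcond
            rw [heq]
            refine ⟨fun x hx => hx, fun y hy hyn => absurd hy hyn, ?_,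
              fun y hy hyn => absurd hy hyn, ?_⟩
            · intro z hz
              rw [hsIf] at hz
              split_ifs at hz with hc2
              · have : z = lf := by simpa using hz
                subst this
                rcases not_and_or.1 hcond with hc | hc
                · exact absurd hc2 hc
                · simpa using hc
              · simp at hz
            · intro l'
              constructor
              · exact fun h => Or.inl h
              · rintro (h | h | ⟨h1, h2⟩)
                · exact h
                · exact absurd (congrArg Prod.snd h).symm hft
                · exact absurd h1 h2

-- ===== VERDICT (by name: the statement is the Claim_ definition above) =====
theorem get_labels_at_frame_py_spec : Claim_equal_get_labels_at_frame_py := by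
  intro label frame t prev gap _
  unfold Spec_get_labels_at_frame_py
  unfold get_labels_at_frame_py get_labels_at_frame_py_alt
  split_ifs with h1 h2
  · rfl
  · rfl
  · have hne : frame ≠ t := h2
    have hv0 : PySem.Set.add PySem.Set.empty ((label, frame) : Int × Int) = [(label, frame)] := by
      rw [PySem.Set.add_of_not_mem (by simp [PySem.Set.empty])]
      simp [PySem.Set.empty]
    rw [hv0]
    have hA := pvALoop_chr t prev gap (pvFuel prev gap) [(label, frame)] [(label, frame)]
      PySem.Set.empty
      (fun x hx => hx)
      (fun x hx hnx => absurd hx hnx)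
      (fun l hl => by simp [PySem.Set.empty] at hl)
      (fun x hx _ => Or.inl hx)
      (by have := pvMu_lt_fuel prev gap [(label, frame)]; simp; omega)
    obtain ⟨c1, c2, c3, c4, c5⟩ := pvBVisit_chr t prev gap (pvFuel prev gap) label frame
      [(label, frame)] []
      (by simp)
      (pvMu_lt_fuel prev gap [(label, frame)])
    have hclosed : ∀ y ∈ (pvBVisit t prev gap (pvFuel prev gap) label frame
        ([(label, frame)], [])).1, ∀ z ∈ pvSuccs t prev gap y,
        z ∈ (pvBVisit t prev gap (pvFuel prev gap) label frame ([(label, frame)], [])).1 := by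
      intro y hy z hz
      by_cases hy0 : y = (label, frame)
      · subst hy0
        exact c3 z hz
      · exact c4 y hy (by simp [hy0]) z hz
    have hstartS : (label, frame) ∈ (pvBVisit t prev gap (pvFuel prev gap) label frame
        ([(label, frame)], [])).1 := c1 _ (by simp)
    have hS1 : ∀ y, y ∈ (pvBVisit t prev gap (pvFuel prev gap) label frame
        ([(label, frame)], [])).1 ↔ pvReach t prev gap (label, frame) y := by
      intro y
      constructor
      · intro hy
        by_cases hy0 : y = (label, frame)
        · rw [hy0]; exact Relation.ReflTransGen.refl
        · exact c2 y hy (by simp [hy0])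
      · intro hre
        exact pvReach_mem t prev gap _ hclosed (label, frame) y hstartS hre
    have hiff : ∀ l' : Int,
        l' ∈ pvALoop t prev gap (pvFuel prev gap) [(label, frame)] [(label, frame)]
          PySem.Set.empty ↔
        l' ∈ (pvBVisit t prev gap (pvFuel prev gap) label frame ([(label, frame)], [])).2 := by
      intro l'
      rw [hA l', c5 l']
      constructor
      · rintro ⟨s, hs, hre⟩
        have hs' : s = (label, frame) := by simpa using hs
        subst hs'
        refine Or.inr (Or.inr ⟨(hS1 _).2 hre, ?_⟩)
        intro hmem
        have : ((l', t) : Int × Int) = (label, frame) := by simpa using hmem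
        exact hne ((congrArg Prod.snd this).symm)
      · rintro (h | h | ⟨h1, _⟩)
        · simp at h
        · exact absurd ((congrArg Prod.snd h).symm) hne
        · exact ⟨(label, frame), by simp, (hS1 _).1 h1⟩
    rw [PySem.List.sorted_id_eq_sorted_id_iff_perm]
    rw [List.perm_ext_iff_of_nodup (PySem.Set.nodup_ofList _) (PySem.Set.nodup_ofList _)]
    intro a
    rw [PySem.Set.mem_ofList, PySem.Set.mem_ofList]
    exact hiff a
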